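-- pv_equiv track=rewrite | github.com/mupengbo/algorithm | split_seq.py | sum_sub_seq_less_than_threshold
-- ===== SOURCE A (Python) =====
-- def sum_sub_seq_less_than_threshold(seq, threshold):
--     sub_length = len(seq)
--     while sub_length >= 1:
--         index = 0
--         while index + sub_length <= len(seq):
--             sub_seq = seq[index: index+sub_length]
--             if sum(sub_seq) <= threshold:
--                 yield sub_seq
--             index += 1
--         sub_length -= 1
-- ===== SOURCE B (Python) =====
-- def sum_sub_seq_less_than_threshold(seq, threshold):
--     # Prefix-sum table: each window sum is a difference of two prefix sums instead of re-summing the slice.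
--     n = len(seq)
--     pre = [0]
--     s = 0
--     for x in seq:
--         s += x
--         pre.append(s)
--     for length in range(n, 0, -1):
--         for i in range(0, n - length + 1):
--             if pre[i + length] - pre[i] <= threshold:
--                 yield seq[i:i + length]
-- ===== Notes on version B (the rewrite author's own statement) =====
-- stated objective: alternative
-- what changed: B precomputes a prefix-sum array once and tests each window by a prefix difference, instead of A's re-slicing and re-summing every window.
import Mathlib
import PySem

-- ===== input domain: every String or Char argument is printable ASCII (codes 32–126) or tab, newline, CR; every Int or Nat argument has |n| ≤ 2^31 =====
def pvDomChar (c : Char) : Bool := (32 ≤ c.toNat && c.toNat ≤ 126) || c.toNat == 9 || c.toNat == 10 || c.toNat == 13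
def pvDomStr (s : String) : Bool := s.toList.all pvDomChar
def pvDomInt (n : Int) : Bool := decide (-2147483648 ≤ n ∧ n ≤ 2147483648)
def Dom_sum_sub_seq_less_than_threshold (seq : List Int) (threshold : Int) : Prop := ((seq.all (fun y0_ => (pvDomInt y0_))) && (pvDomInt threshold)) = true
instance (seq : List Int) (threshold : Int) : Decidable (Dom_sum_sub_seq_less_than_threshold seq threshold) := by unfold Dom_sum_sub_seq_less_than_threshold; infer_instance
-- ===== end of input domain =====

-- B replaces A's per-window slice-and-sum with a prefix-sum table (each window sum is a
-- difference of two prefix sums); equivalence of the return values is proved below.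

-- ===== PORT A =====
-- inner 'while index + sub_length <= len(seq)' loop of A
def pvAInner (seq : List Int) (threshold : Int) (subLen index : Nat) : List (List Int) :=
  if h : index + subLen ≤ seq.length then
    (if (PySem.List.slice seq (some (index : Int)) (some ((index : Int) + (subLen : Int)))).sum ≤ threshold
       then [PySem.List.slice seq (some (index : Int)) (some ((index : Int) + (subLen : Int)))]
       else [])
    ++ pvAInner seq threshold subLen (index + 1)
  else []
termination_by seq.length + 1 - (index + subLen)
decreasing_by omega

-- outer 'while sub_length >= 1' loop of A
def pvAOuter (seq : List Int) (threshold : Int) : Nat → List (List Int)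
  | 0 => []
  | Nat.succ k => pvAInner seq threshold (k + 1) 0 ++ pvAOuter seq threshold k

def sum_sub_seq_less_than_threshold (seq : List Int) (threshold : Int) : List (List Int) :=
  pvAOuter seq threshold seq.length

-- ===== PORT B =====
-- B's prefix-sum table: pre = [0]; for x in seq: s += x; pre.append(s)
def pvBPre (seq : List Int) : List Int :=
  (seq.foldl (fun acc x => (acc.1 + x, acc.2 ++ [acc.1 + x])) ((0 : Int), ([(0 : Int)]))).2

def sum_sub_seq_less_than_threshold_alt (seq : List Int) (threshold : Int) : List (List Int) :=
  let n : Int := seq.length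
  let pre := pvBPre seq
  (PySem.List.pyRange n 0 (-1)).flatMap (fun L =>
    (PySem.List.pyRange 0 (n - L + 1) 1).flatMap (fun i =>
      if PySem.List.pyGetD pre (i + L) 0 - PySem.List.pyGetD pre i 0 ≤ threshold
        then [PySem.List.slice seq (some i) (some (i + L))]
        else []))

-- ===== PRECONDITION & SPEC =====
def Spec_sum_sub_seq_less_than_threshold (seq : List Int) (threshold : Int) (out : List (List Int)) : Prop := out = sum_sub_seq_less_than_threshold_alt seq threshold
instance (seq : List Int) (threshold : Int) (out : List (List Int)) : Decidable (Spec_sum_sub_seq_less_than_threshold seq threshold out) := by unfold Spec_sum_sub_seq_less_than_threshold; infer_instance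

-- ===== CLAIM (what is proved, stated in full; the proofs are below) =====
def Claim_equal_sum_sub_seq_less_than_threshold : Prop := ∀ (seq : List Int) (threshold : Int), Dom_sum_sub_seq_less_than_threshold seq threshold → Spec_sum_sub_seq_less_than_threshold seq threshold (sum_sub_seq_less_than_threshold seq threshold)

-- ===== LEMMAS AND PROOFS =====

-- running partial sums of xs starting from accumulator s
def pvSums : List Int → Int → List Int
  | [], _ => []
  | x :: xs, s => (s + x) :: pvSums xs (s + x)

theorem pvBPre_foldl (xs : List Int) : ∀ (s : Int) (acc : List Int),
    (xs.foldl (fun acc x => (acc.1 + x, acc.2 ++ [acc.1 + x])) (s, acc)).2 = acc ++ pvSums xs s := by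
  induction xs with
  | nil => intro s acc; simp [pvSums]
  | cons x xs ih => intro s acc; simp [pvSums, ih (s + x) (acc ++ [s + x])]

theorem pvBPre_eq (seq : List Int) : pvBPre seq = 0 :: pvSums seq 0 := by
  simp [pvBPre, pvBPre_foldl seq 0 [0]]

theorem pvSums_getD (xs : List Int) : ∀ (s : Int) (k : Nat), k < xs.length →
    (pvSums xs s).getD k 0 = s + (xs.take (k + 1)).sum := by
  induction xs with
  | nil => intro s k h; simp at h
  | cons x xs ih =>
    intro s k h
    cases k with
    | zero => simp [pvSums]
    | succ k =>
      simp only [pvSums, List.getD_cons_succ, List.take_succ_cons, List.sum_cons]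
      rw [ih (s + x) k (by simpa using h)]; ring

theorem pvPre_getD (seq : List Int) (k : Nat) (hk : k ≤ seq.length) :
    PySem.List.pyGetD (pvBPre seq) (k : Int) 0 = (seq.take k).sum := by
  rw [pvBPre_eq, PySem.List.pyGetD_natCast]
  cases k with
  | zero => simp
  | succ k =>
    simp only [List.getD_cons_succ]
    rw [pvSums_getD seq 0 k (by omega)]; simp

theorem pvWindow_sum (seq : List Int) (i L : Nat) :
    ((seq.drop i).take L).sum = (seq.take (i + L)).sum - (seq.take i).sum := by
  rw [List.take_add]; simp

-- inner loops agree: A's index loop equals B's flatMap over range(i, n-L+1)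
theorem pvInner_eq (seq : List Int) (threshold : Int) (L : Nat) (hL : 1 ≤ L) :
    ∀ (i : Nat),
    pvAInner seq threshold L i =
      (PySem.List.pyRange (i : Int) ((seq.length : Int) - (L : Int) + 1) 1).flatMap (fun j =>
        if PySem.List.pyGetD (pvBPre seq) (j + (L : Int)) 0 - PySem.List.pyGetD (pvBPre seq) j 0 ≤ threshold
          then [PySem.List.slice seq (some j) (some (j + (L : Int)))]
          else []) := by
  intro i
  by_cases h : i + L ≤ seq.length
  · rw [PySem.List.pyRange_one_cons (by omega)]
    rw [List.flatMap_cons]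
    rw [pvAInner]
    simp only [h, dite_true]
    have hiter := pvInner_eq seq threshold L hL (i + 1)
    rw [hiter]
    have hcond : PySem.List.pyGetD (pvBPre seq) ((i : Int) + (L : Int)) 0 - PySem.List.pyGetD (pvBPre seq) (i : Int) 0
        = (PySem.List.slice seq (some (i : Int)) (some ((i : Int) + (L : Int)))).sum := by
      rw [PySem.List.slice_natCast_add, pvWindow_sum]
      rw [pvPre_getD seq i (by omega)]
      have : ((i : Int) + (L : Int)) = ((i + L : Nat) : Int) := by push_cast; ring
      rw [this, pvPre_getD seq (i + L) h]
    rw [hcond]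
    push_cast
    ring_nf
  · rw [pvAInner]
    simp only [h, dite_false]
    rw [PySem.List.pyRange_one_eq_nil (by omega)]
    simp
termination_by i => seq.length + 1 - (i + L)
decreasing_by omega

-- outer loops agree: A's countdown equals B's flatMap over range(k, 0, -1)
theorem pvOuter_eq (seq : List Int) (threshold : Int) : ∀ (k : Nat), k ≤ seq.length →
    pvAOuter seq threshold k =
      (PySem.List.pyRange (k : Int) 0 (-1)).flatMap (fun L =>
        (PySem.List.pyRange 0 ((seq.length : Int) - L + 1) 1).flatMap (fun i =>
          if PySem.List.pyGetD (pvBPre seq) (i + L) 0 - PySem.List.pyGetD (pvBPre seq) i 0 ≤ threshold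
            then [PySem.List.slice seq (some i) (some (i + L))]
            else [])) := by
  intro k
  induction k with
  | zero => intro _; simp [pvAOuter, PySem.List.pyRange_neg_one_eq_nil]
  | succ k ih =>
    intro hk
    rw [pvAOuter, ih (by omega), pvInner_eq seq threshold (k + 1) (by omega) 0]
    have hc : ((k + 1 : Nat) : Int) = (k : Int) + 1 := by push_cast; ring
    have hr : PySem.List.pyRange ((k : Int) + 1) 0 (-1)
        = ((k : Int) + 1) :: PySem.List.pyRange (k : Int) 0 (-1) := by
      rw [PySem.List.pyRange_neg_one_cons (by omega)]; norm_num
    rw [hc, hr, List.flatMap_cons]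
    norm_num

-- ===== VERDICT (by name: the statement is the Claim_ definition above) =====
theorem sum_sub_seq_less_than_threshold_spec : Claim_equal_sum_sub_seq_less_than_threshold := by
  intro seq threshold _
  unfold Spec_sum_sub_seq_less_than_threshold sum_sub_seq_less_than_threshold sum_sub_seq_less_than_threshold_alt
  rw [pvOuter_eq seq threshold seq.length (le_refl _)]
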